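-- pv_equiv track=rewrite | github.com/juliecsl/TER_Isomorphism | src/Version2.py | Traduction
-- ===== SOURCE A (Python) =====
-- def Traduction(parcours):
--     """
--     """
--
--     dico = dict()
--     res = list()
--     k = 1
--
--     for vertex in parcours:
--         if vertex not in dico.keys():
--             dico[vertex] = k
--             k += 1
--         res.append(dico[vertex])
--
--     return res
-- ===== SOURCE B (Python) =====
-- def Traduction(parcours):
--     parcours = list(parcours)
--     # label of v = number of distinct values in the prefix ending at v's first occurrence
--     return [len(set(parcours[:parcours.index(v) + 1])) for v in parcours]
-- ===== Notes on version B (the rewrite author's own statement) =====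
-- stated objective: alternative
-- what changed: Drops A's incrementally built label dictionary and counter entirely: each element's label is computed independently as the closed form len(set(prefix up to its first occurrence)), trading the single table-building pass for a per-element prefix-distinct-count.
import Mathlib
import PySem

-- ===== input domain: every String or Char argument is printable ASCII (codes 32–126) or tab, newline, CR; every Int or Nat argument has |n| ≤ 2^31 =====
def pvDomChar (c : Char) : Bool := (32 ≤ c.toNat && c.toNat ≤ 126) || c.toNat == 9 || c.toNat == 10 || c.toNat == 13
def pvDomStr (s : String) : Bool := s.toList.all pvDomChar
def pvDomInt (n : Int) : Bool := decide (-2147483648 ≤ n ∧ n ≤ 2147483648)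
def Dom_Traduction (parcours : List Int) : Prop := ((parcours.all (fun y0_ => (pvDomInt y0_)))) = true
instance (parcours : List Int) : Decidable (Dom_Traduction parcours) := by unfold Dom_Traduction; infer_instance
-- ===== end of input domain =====

-- B drops A's incrementally built label dictionary and counter: each element's label is
-- the closed form len(set(prefix up to its first occurrence)) (alternative; O(n^2) vs A's O(n)).

-- ===== PORT A =====
-- A's loop: dico grows with fresh labels k, res appends dico[vertex] each step.
def Traduction (parcours : List Int) : List Int :=
  (parcours.foldl
    (fun (st : PySem.Dict Int Int × List Int × Int) vertex =>
      let dico := st.1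
      let res := st.2.1
      let k := st.2.2
      if dico.contains vertex then
        (dico, res ++ [dico.getD vertex 0], k)
      else
        let dico' := dico.insert vertex k
        (dico', res ++ [dico'.getD vertex 0], k + 1))
    (PySem.Dict.empty, ([], 1))).2.1

-- ===== PORT B =====
-- [len(set(parcours[:parcours.index(v) + 1])) for v in parcours]
-- (the 'none' branch is unreachable: v is drawn from parcours, so .index cannot raise)
def Traduction_alt (parcours : List Int) : List Int :=
  parcours.map (fun v =>
    match PySem.List.index? parcours v with
    | some j =>
        ((PySem.Set.ofList (PySem.List.slice parcours none (some ((j : Int) + 1)))).length : Int)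
    | none => 0)

-- ===== PRECONDITION & SPEC =====
def Spec_Traduction (parcours : List Int) (out : List Int) : Prop := out = Traduction_alt parcours
instance (parcours : List Int) (out : List Int) : Decidable (Spec_Traduction parcours out) := by unfold Spec_Traduction; infer_instance

-- ===== CLAIM (what is proved, stated in full; the proofs are below) =====
def Claim_equal_Traduction : Prop := ∀ (parcours : List Int), Dom_Traduction parcours → Spec_Traduction parcours (Traduction parcours)

-- ===== LEMMAS AND PROOFS =====

-- A's label table after having seen the list u, as a function of u.
def orderDict (u : List Int) : PySem.Dict Int Int :=
  (PySem.List.enumerate (PySem.List.dedup u) 0).foldl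
    (fun (d : PySem.Dict Int Int) p => d.insert p.2 (p.1 + 1)) PySem.Dict.empty

theorem orderDict_items (u : List Int) :
    (orderDict u).items
      = (PySem.List.enumerate (PySem.List.dedup u) 0).map (fun p => (p.2, p.1 + 1)) := by
  unfold orderDict
  have := PySem.Dict.items_foldl_insert_fresh
    (l := PySem.List.enumerate (PySem.List.dedup u) 0)
    (k := fun p => p.2) (v := fun p => p.1 + 1) (d := PySem.Dict.empty)
    (by intro a _; simp) (by rw [PySem.List.map_snd_enumerate]; exact PySem.List.nodup_dedup u)
  simp at this; exact this

theorem orderDict_keys (u : List Int) : (orderDict u).keys = PySem.List.dedup u := by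
  have h := orderDict_items u
  have : (orderDict u).keys = (orderDict u).items.map (·.1) := rfl
  rw [this, h, List.map_map]
  have : ((fun p : Int × Int => p.1) ∘ fun p : Int × Int => (p.2, p.1 + 1))
      = fun p : Int × Int => p.2 := rfl
  rw [this, PySem.List.map_snd_enumerate]

theorem orderDict_keys_nodup (u : List Int) : (orderDict u).keys.Nodup := by
  rw [orderDict_keys]; exact PySem.List.nodup_dedup u

theorem orderDict_contains (u : List Int) (v : Int) :
    (orderDict u).contains v = decide (v ∈ u) := by
  rw [PySem.Dict.contains_eq_decide_mem_keys, orderDict_keys]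
  simp

theorem orderDict_getD (u : List Int) (v : Int) (i : Nat)
    (h : PySem.List.index? (PySem.List.dedup u) v = some i) :
    (orderDict u).getD v 0 = (i : Int) + 1 := by
  obtain ⟨hk, hv, -⟩ := PySem.List.getElem_of_index?_eq_some h
  have hmem : ((i : Int), v) ∈ PySem.List.enumerate (PySem.List.dedup u) 0 := by
    rw [PySem.List.mem_enumerate_iff]
    exact ⟨i, hk, by rw [hv, zero_add]⟩
  have : (v, (i : Int) + 1) ∈ (orderDict u).items := by
    rw [orderDict_items]
    exact List.mem_map.mpr ⟨((i : Int), v), hmem, rfl⟩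
  exact PySem.Dict.getD_of_mem_items _ this (orderDict_keys_nodup u) 0

-- labels already assigned are stable under seeing more elements
theorem orderDict_getD_stable (s t : List Int) (v : Int) (hv : v ∈ s) :
    (orderDict (s ++ t)).getD v 0 = (orderDict s).getD v 0 := by
  have hidx : PySem.List.index? (PySem.List.dedup (s ++ t)) v
      = PySem.List.index? (PySem.List.dedup s) v := by
    rw [PySem.List.dedup_eq_ofList, PySem.List.dedup_eq_ofList,
        PySem.Set.ofList_append, PySem.Set.update_eq_append_filter]
    exact PySem.List.index?_append_of_mem _ ((PySem.Set.mem_ofList _ _).mpr hv)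
  have hmem : v ∈ PySem.List.dedup s := (PySem.List.mem_dedup _ _).mpr hv
  obtain ⟨i, hi⟩ := Option.isSome_iff_exists.mp ((PySem.List.index?_isSome_iff _ _).mpr hmem)
  rw [orderDict_getD s v i hi, orderDict_getD (s ++ t) v i (by rw [hidx]; exact hi)]

theorem orderDict_snoc_mem (s : List Int) (x : Int) (hx : x ∈ s) :
    orderDict (s ++ [x]) = orderDict s := by
  unfold orderDict
  rw [PySem.List.dedup_eq_ofList, PySem.Set.ofList_append_singleton,
      PySem.Set.add_of_mem ((PySem.Set.mem_ofList _ _).mpr hx), ← PySem.List.dedup_eq_ofList]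

theorem orderDict_snoc_not_mem (s : List Int) (x : Int) (hx : x ∉ s) :
    orderDict (s ++ [x])
      = (orderDict s).insert x ((PySem.List.dedup s).length + 1) := by
  unfold orderDict
  rw [PySem.List.dedup_eq_ofList, PySem.Set.ofList_append_singleton,
      PySem.Set.add_of_not_mem (fun h => hx ((PySem.Set.mem_ofList _ _).mp h)),
      PySem.List.enumerate_append, List.foldl_append, ← PySem.List.dedup_eq_ofList]
  simp [PySem.List.enumerate]

theorem dedup_snoc_mem_length (s : List Int) (x : Int) (hx : x ∈ s) :
    (PySem.List.dedup (s ++ [x])).length = (PySem.List.dedup s).length := by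
  rw [PySem.List.dedup_eq_ofList, PySem.Set.ofList_append_singleton,
      PySem.Set.add_of_mem ((PySem.Set.mem_ofList _ _).mpr hx), PySem.List.dedup_eq_ofList]

theorem dedup_snoc_not_mem_length (s : List Int) (x : Int) (hx : x ∉ s) :
    (PySem.List.dedup (s ++ [x])).length = (PySem.List.dedup s).length + 1 := by
  rw [PySem.List.dedup_eq_ofList, PySem.Set.ofList_append_singleton,
      PySem.Set.add_of_not_mem (fun h => hx ((PySem.Set.mem_ofList _ _).mp h))]
  simp [PySem.List.dedup_eq_ofList]

-- Loop invariant for A's fold: starting from the state corresponding to seen prefix s.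
theorem loop_invariant (xs : List Int) : ∀ (s acc : List Int),
    (xs.foldl
      (fun (st : PySem.Dict Int Int × List Int × Int) vertex =>
        let dico := st.1
        let res := st.2.1
        let k := st.2.2
        if dico.contains vertex then
          (dico, res ++ [dico.getD vertex 0], k)
        else
          let dico' := dico.insert vertex k
          (dico', res ++ [dico'.getD vertex 0], k + 1))
      (orderDict s, (acc, ((PySem.List.dedup s).length : Int) + 1))).2.1
    = acc ++ xs.map (fun v => (orderDict (s ++ xs)).getD v 0) := by
  induction xs with
  | nil => intro s acc; simp
  | cons x xs ih =>
    intro s acc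
    by_cases hx : x ∈ s
    · rw [List.foldl_cons]
      simp only [orderDict_contains, hx, decide_true, if_true]
      have e1 : orderDict (s ++ [x]) = orderDict s := orderDict_snoc_mem s x hx
      have e2 := dedup_snoc_mem_length s x hx
      have := ih (s ++ [x]) (acc ++ [(orderDict s).getD x 0])
      rw [e1, e2] at this
      rw [this]
      have hxfull : (orderDict (s ++ x :: xs)).getD x 0 = (orderDict s).getD x 0 := by
        have := orderDict_getD_stable s (x :: xs) x hx
        simpa using this
      simp [List.append_assoc, hxfull]
    · rw [List.foldl_cons]
      simp only [orderDict_contains, hx, decide_false]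
      have e1 : orderDict (s ++ [x])
          = (orderDict s).insert x (((PySem.List.dedup s).length : Int) + 1) := by
        rw [orderDict_snoc_not_mem s x hx]; try norm_num
      have e2 := dedup_snoc_not_mem_length s x hx
      have := ih (s ++ [x])
        (acc ++ [((orderDict s).insert x (((PySem.List.dedup s).length : Int) + 1)).getD x 0])
      rw [e1, e2] at this
      push_cast at this ⊢
      rw [this]
      have hxfull : (orderDict (s ++ x :: xs)).getD x 0
          = ((orderDict s).insert x (((PySem.List.dedup s).length : Int) + 1)).getD x 0 := by
        have h1 : (orderDict ((s ++ [x]) ++ xs)).getD x 0 = (orderDict (s ++ [x])).getD x 0 :=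
          orderDict_getD_stable (s ++ [x]) xs x (by simp)
        rw [List.append_assoc] at h1
        simpa [e1] using h1
      simp [List.append_assoc, hxfull]

-- A's label of v equals B's closed form: distinct count of the prefix ending at v's first occurrence.
theorem b_value (parcours : List Int) (v : Int) (j : Nat)
    (hj : PySem.List.index? parcours v = some j) :
    (orderDict parcours).getD v 0
      = ((PySem.Set.ofList (PySem.List.slice parcours none (some ((j : Int) + 1)))).length : Int) := by
  obtain ⟨hk, hv, hprev⟩ := PySem.List.getElem_of_index?_eq_some hj
  have hnt : v ∉ parcours.take j := by
    intro h
    obtain ⟨i, hi, hgi⟩ := List.mem_iff_getElem.mp h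
    have hij : i < j := lt_of_lt_of_le hi (by simp [List.length_take])
    have : parcours[i]'(lt_of_lt_of_le hij (le_of_lt hk)) = v := by
      rw [← hgi]; simp [List.getElem_take]
    exact hprev i hij this
  have htake : parcours.take (j + 1) = parcours.take j ++ [v] := by
    rw [List.take_add_one]
    simp [List.getElem?_eq_getElem hk, hv]
  have hded : PySem.List.dedup (parcours.take (j + 1))
      = PySem.List.dedup (parcours.take j) ++ [v] := by
    rw [htake, PySem.List.dedup_eq_ofList, PySem.Set.ofList_append_singleton,
        PySem.Set.add_of_not_mem (fun h => hnt ((PySem.Set.mem_ofList _ _).mp h)),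
        ← PySem.List.dedup_eq_ofList]
  have hidx : PySem.List.index? (PySem.List.dedup parcours) v
      = some (PySem.List.dedup (parcours.take j)).length := by
    conv_lhs => rw [show parcours = parcours.take (j + 1) ++ parcours.drop (j + 1) from
      (List.take_append_drop _ _).symm]
    rw [PySem.List.dedup_eq_ofList, PySem.Set.ofList_append, PySem.Set.update_eq_append_filter,
        PySem.List.index?_append_of_mem _
          ((PySem.Set.mem_ofList _ _).mpr (by rw [htake]; simp)),
        ← PySem.List.dedup_eq_ofList, hded]
    exact PySem.List.index?_append_singleton_self _ _
      (fun h => hnt ((PySem.List.mem_dedup _ _).mp h))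
  rw [orderDict_getD parcours v _ hidx]
  have hslice : PySem.List.slice parcours none (some ((j : Int) + 1)) = parcours.take (j + 1) := by
    rw [show ((j : Int) + 1) = (((j + 1 : Nat) : Int)) by push_cast; ring]
    exact PySem.List.slice_to_natCast parcours (j + 1)
  rw [hslice, show PySem.Set.ofList (parcours.take (j + 1))
      = PySem.List.dedup (parcours.take (j + 1)) from (PySem.List.dedup_eq_ofList _).symm, hded]
  simp

-- ===== VERDICT (by name: the statement is the Claim_ definition above) =====
theorem Traduction_spec : Claim_equal_Traduction := by
  intro parcours _
  unfold Spec_Traduction Traduction_alt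
  have hA : Traduction parcours = parcours.map (fun v => (orderDict parcours).getD v 0) := by
    unfold Traduction
    have h := loop_invariant parcours [] []
    simp only [List.nil_append] at h
    have h0 : orderDict ([] : List Int) = PySem.Dict.empty := rfl
    have h1 : ((PySem.List.dedup ([] : List Int)).length : Int) + 1 = 1 := rfl
    rw [h0, h1] at h
    exact h
  rw [hA]
  apply List.map_congr_left
  intro v hv
  obtain ⟨j, hj⟩ := Option.isSome_iff_exists.mp ((PySem.List.index?_isSome_iff _ _).mpr hv)
  rw [hj]
  exact b_value parcours v j hj
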